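-- pv_equiv track=rewrite | github.com/leechanhoe/study-algorithm | src/programmers/level1/신고_결과_받기.py | solution
-- ===== SOURCE A (Python) =====
-- def solution(id_list, report, k):
--     from collections import defaultdict
--
--     answer = []
--     declared = defaultdict(int)
--     user = defaultdict(set)
--     for r in report:
--         a, b = r.split()
--         if b not in user[a]:
--             declared[b] += 1
--             user[a].add(b)
--
--     for name in id_list:
--         cnt = 0
--         for d in user[name]:
--             if declared[d] >= k:
--                 cnt += 1
--         answer.append(cnt)
--
--     return answer
-- ===== SOURCE B (Python) =====
-- def solution(id_list, report, k):
--     # Global deduplicated pair list + target counter, instead of per-user sets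
--     # with an incrementally maintained report counter.
--     pairs = []
--     seen = set()
--     for r in report:
--         p = tuple(r.split())
--         if p not in seen:
--             seen.add(p)
--             pairs.append(p)
--     cnt = {}
--     for a, b in pairs:
--         cnt[b] = cnt.get(b, 0) + 1
--     return [sum(1 for a, b in pairs if a == name and cnt[b] >= k) for name in id_list]
-- ===== Notes on version B (the rewrite author's own statement) =====
-- stated objective: alternative
-- what changed: Replaces A's per-reporter set dict plus incrementally maintained report counter (with a nested loop over each user's set) by one globally deduplicated (reporter,target) pair list, a counter built over it in a second pass, and a per-id comprehension counting banned targets.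
import Mathlib
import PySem

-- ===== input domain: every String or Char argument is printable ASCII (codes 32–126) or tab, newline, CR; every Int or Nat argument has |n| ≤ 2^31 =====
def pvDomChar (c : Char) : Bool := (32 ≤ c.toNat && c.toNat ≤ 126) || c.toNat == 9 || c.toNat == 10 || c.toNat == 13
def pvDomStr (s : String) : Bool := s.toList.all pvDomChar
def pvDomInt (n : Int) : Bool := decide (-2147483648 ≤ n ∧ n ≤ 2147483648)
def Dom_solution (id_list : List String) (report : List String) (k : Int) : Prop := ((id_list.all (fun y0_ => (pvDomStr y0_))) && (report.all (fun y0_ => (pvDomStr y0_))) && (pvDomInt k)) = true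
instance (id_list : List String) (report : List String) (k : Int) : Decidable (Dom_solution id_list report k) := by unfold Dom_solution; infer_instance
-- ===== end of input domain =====

-- B replaces A's per-reporter set dict plus incrementally maintained report counter by one
-- globally deduplicated pair list, a counter pass over it and a per-id count (alternative
-- decomposition, similar cost).

-- ===== PORT A =====
-- One step of A's first loop over `report`; state = (declared, user).  On a report that does
-- not split into exactly two words Python raises ValueError at `a, b = r.split()`; such
-- inputs are excluded by Pre_solution, the port leaves the state unchanged there.
def stepA (st : PySem.Dict String Int × PySem.Dict String (PySem.Set String)) (r : String) :
    PySem.Dict String Int × PySem.Dict String (PySem.Set String) :=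
  match PySem.Str.split₀ r with
  | [a, b] =>
      let ua := st.2.getD a PySem.Set.empty
      let user := st.2.insert a ua          -- defaultdict materializes user[a]
      if PySem.Set.contains ua b then (st.1, user)
      else (st.1.modify b 0 (· + 1), user.insert a (PySem.Set.add ua b))
  | _ => st

def solution (id_list : List String) (report : List String) (k : Int) : List Int :=
  let st := report.foldl stepA (PySem.Dict.empty, PySem.Dict.empty)
  -- second loop: iterating the set user[name] only accumulates a count, which is independent
  -- of Python's set iteration order, so folding over the Set's list is exact
  id_list.foldl (fun answer name =>
    let cnt := (st.2.getD name PySem.Set.empty).foldl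
        (fun cnt d => if st.1.getD d 0 ≥ k then cnt + 1 else cnt) (0 : Int)
    answer ++ [cnt]) []

-- ===== PORT B =====
-- One step of B's dedup loop; state = (pairs, seen).  As in A's port, a report that does not
-- split into exactly two words (Python B raises unpacking it later) leaves the state unchanged.
def stepB (st : List (String × String) × PySem.Set (String × String)) (r : String) :
    List (String × String) × PySem.Set (String × String) :=
  match PySem.Str.split₀ r with
  | [a, b] =>
      if PySem.Set.contains st.2 (a, b) then st
      else (st.1 ++ [(a, b)], PySem.Set.add st.2 (a, b))
  | _ => st

def solution_alt (id_list : List String) (report : List String) (k : Int) : List Int :=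
  let pairs := (report.foldl stepB ([], PySem.Set.empty)).1
  let cnt := pairs.foldl (fun d p => d.modify p.2 0 (· + 1)) PySem.Dict.empty
  id_list.map (fun name =>
    ((pairs.countP (fun p => p.1 == name && decide (cnt.getD p.2 0 ≥ k)) : Nat) : Int))

-- ===== PRECONDITION & SPEC =====
-- Pre_ excludes exactly the reports that do not split into two whitespace-separated words,
-- on which A raises ValueError at `a, b = r.split()`.
def Pre_solution (id_list : List String) (report : List String) (k : Int) : Prop :=
  ∀ r ∈ report, (PySem.Str.split₀ r).length = 2

instance (id_list : List String) (report : List String) (k : Int) : Decidable (Pre_solution id_list report k) := by unfold Pre_solution; infer_instance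

def pvWitness_solution : List String × List String × Int :=
  (["muzi", "frodo", "apeach", "neo"],
   ["muzi frodo", "apeach frodo", "frodo neo", "muzi neo", "apeach muzi"], 2)

def Spec_solution (id_list : List String) (report : List String) (k : Int) (out : List Int) : Prop := out = solution_alt id_list report k
instance (id_list : List String) (report : List String) (k : Int) (out : List Int) : Decidable (Spec_solution id_list report k out) := by unfold Spec_solution; infer_instance

-- ===== CLAIM (what is proved, stated in full; the proofs are below) =====
def Claim_equal_solution : Prop := ∀ (id_list : List String) (report : List String) (k : Int), Dom_solution id_list report k → Pre_solution id_list report k → Spec_solution id_list report k (solution id_list report k)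

-- ===== LEMMAS AND PROOFS =====

-- the invariant tying A's loop state (declared, user) to B's deduplicated pair list
def PairInv (dec : PySem.Dict String Int) (usr : PySem.Dict String (PySem.Set String))
    (pairs : List (String × String)) : Prop :=
  (∀ b, dec.getD b 0 = ((pairs.map Prod.snd).count b : Int)) ∧
  (∀ a, usr.getD a PySem.Set.empty = (pairs.filter (fun p => p.1 == a)).map Prod.snd)

lemma mem_snd_filter_iff (pairs : List (String × String)) (a b : String) :
    b ∈ (pairs.filter (fun p => p.1 == a)).map Prod.snd ↔ (a, b) ∈ pairs := by
  simp only [List.mem_map, List.mem_filter, beq_iff_eq]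
  constructor
  · rintro ⟨⟨x, y⟩, ⟨hm, h1⟩, h2⟩; cases h1; cases h2; exact hm
  · intro h; exact ⟨(a, b), ⟨h, rfl⟩, rfl⟩

lemma step_inv (r : String) (dec : PySem.Dict String Int)
    (usr : PySem.Dict String (PySem.Set String)) (pairs : List (String × String))
    (h : PairInv dec usr pairs) :
    (stepB (pairs, pairs) r).2 = (stepB (pairs, pairs) r).1 ∧
    PairInv (stepA (dec, usr) r).1 (stepA (dec, usr) r).2 (stepB (pairs, pairs) r).1 := by
  cases hsp : PySem.Str.split₀ r with
  | nil => simp only [stepA, stepB, hsp]; exact ⟨trivial, h⟩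
  | cons a tl =>
    cases tl with
    | nil => simp only [stepA, stepB, hsp]; exact ⟨trivial, h⟩
    | cons b tl2 =>
      cases tl2 with
      | cons c tl3 => simp only [stepA, stepB, hsp]; exact ⟨trivial, h⟩
      | nil =>
        simp only [stepA, stepB, hsp]
        have hua : usr.getD a PySem.Set.empty = (pairs.filter (fun p => p.1 == a)).map Prod.snd := h.2 a
        have hcond : PySem.Set.contains (usr.getD a PySem.Set.empty) b
            = PySem.Set.contains pairs (a, b) := by
          rw [PySem.Set.contains_eq_decide, PySem.Set.contains_eq_decide, hua]
          simp [mem_snd_filter_iff]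
        by_cases hin : PySem.Set.contains pairs (a, b) = true
        · simp only [hcond, hin, if_pos]
          refine ⟨trivial, h.1, ?_⟩
          intro a'
          by_cases ha : a' = a
          · subst ha; rw [PySem.Dict.getD_insert_self]; exact h.2 a'
          · rw [PySem.Dict.getD_insert_of_ne _ _ _ ha]; exact h.2 a'
        · rw [Bool.not_eq_true] at hin
          simp only [hcond, hin, Bool.false_eq_true, if_false]
          have hmem : (a, b) ∉ pairs := by
            have := PySem.Set.contains_eq_decide pairs (a, b)
            rw [hin] at this; exact of_decide_eq_false this.symm
          have hadd : PySem.Set.add pairs (a, b) = pairs ++ [(a, b)] := by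
            unfold PySem.Set.add; rw [hin]; simp
          refine ⟨hadd, ?_, ?_⟩
          · intro b'
            rw [PySem.Dict.getD_modify]
            by_cases hb : b' = b
            · subst hb
              rw [h.1 b']; simp [List.count_append]
            · rw [if_neg hb, h.1 b']
              simp [List.count_append, Ne.symm hb]
          · intro a'
            by_cases ha : a' = a
            · subst ha
              rw [PySem.Dict.getD_insert_self]
              have haddu : PySem.Set.add (usr.getD a' PySem.Set.empty) b
                  = usr.getD a' PySem.Set.empty ++ [b] := by
                unfold PySem.Set.add
                rw [if_neg]
                rw [hcond, hin]; simp
              rw [haddu, hua]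
              simp [List.filter_append]
            · rw [PySem.Dict.getD_insert_of_ne _ _ _ ha, PySem.Dict.getD_insert_of_ne _ _ _ ha]
              rw [h.2 a']
              have : ((a, b).1 == a') = false := by exact decide_eq_false (fun hc => ha hc.symm)
              simp [List.filter_append, this]

lemma loop_inv (rs : List String) (dec : PySem.Dict String Int)
    (usr : PySem.Dict String (PySem.Set String)) (pairs : List (String × String))
    (h : PairInv dec usr pairs) :
    (rs.foldl stepB (pairs, pairs)).2 = (rs.foldl stepB (pairs, pairs)).1 ∧
    PairInv (rs.foldl stepA (dec, usr)).1 (rs.foldl stepA (dec, usr)).2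
        (rs.foldl stepB (pairs, pairs)).1 := by
  induction rs generalizing dec usr pairs with
  | nil => exact ⟨rfl, h⟩
  | cons r rs ih =>
    obtain ⟨hseen, hinv⟩ := step_inv r dec usr pairs h
    have hB : stepB (pairs, pairs) r = ((stepB (pairs, pairs) r).1, (stepB (pairs, pairs) r).1) :=
      Prod.ext_iff.mpr ⟨rfl, hseen⟩
    have hA : stepA (dec, usr) r = ((stepA (dec, usr) r).1, (stepA (dec, usr) r).2) := rfl
    rw [List.foldl_cons, List.foldl_cons, hB, hA]
    exact ih _ _ _ hinv

lemma solution_eq_alt (id_list report : List String) (k : Int) :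
    solution id_list report k = solution_alt id_list report k := by
  unfold solution solution_alt
  have h0 : PairInv PySem.Dict.empty PySem.Dict.empty [] := by
    constructor <;> intro x <;> simp [pysem]
  obtain ⟨hseen, hinv⟩ := loop_inv report PySem.Dict.empty PySem.Dict.empty [] h0
  set stA := report.foldl stepA (PySem.Dict.empty, PySem.Dict.empty) with hstA
  have hempty : (PySem.Set.empty : PySem.Set (String × String)) = ([] : List (String × String)) := rfl
  set pairs := (report.foldl stepB ([], PySem.Set.empty)).1 with hpairs
  have hp2 : (report.foldl stepB (([] : List (String × String)), ([] : List (String × String)))).1 = pairs := by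
    rw [hpairs, hempty]
  rw [hp2] at hinv
  -- counter of B equals declared of A
  have hcnt : ∀ b, (pairs.foldl (fun d p => d.modify p.2 0 (· + 1)) PySem.Dict.empty).getD b 0
      = stA.1.getD b 0 := by
    intro b
    rw [hinv.1 b]
    have hfold : (List.foldl (fun (d : PySem.Dict String Int) (p : String × String) => d.modify p.2 0 (· + 1)) PySem.Dict.empty pairs)
        = List.foldl (fun d x => d.modify x 0 (· + 1)) PySem.Dict.empty (pairs.map Prod.snd) :=
      (List.foldl_map (f := Prod.snd) (g := fun (d : PySem.Dict String Int) (x : String) => d.modify x 0 (· + 1))).symm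
    rw [hfold, PySem.Dict.getD_foldl_modify_add_one]
    simp [pysem]
  rw [PySem.List.foldl_append_singleton_eq_map]
  rw [List.nil_append]
  apply List.map_congr_left
  intro name _
  rw [PySem.List.foldl_ite_add_one (fun d => stA.1.getD d 0 ≥ k)]
  rw [hinv.2 name]
  rw [List.countP_map, List.countP_filter]
  rw [Int.zero_add]
  congr 1
  apply List.countP_congr
  intro p _
  rw [hcnt p.2]
  simp [Bool.and_comm, Function.comp]


-- ===== VERDICT (by name: the statement is the Claim_ definition above) =====
theorem solution_spec : Claim_equal_solution := by
  intro id_list report k _ _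
  unfold Spec_solution
  exact solution_eq_alt id_list report k
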